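-- pv_equiv track=rewrite | github.com/p-seonggeun/algorithm | 백준/Silver/17615. 볼 모으기/볼 모으기.py | right_red
-- ===== SOURCE A (Python) =====
-- def right_red(balls) :
--     count = 0
--     flag = False
--     for i in range(len(balls) - 1, -1, -1) :
--         if balls[i] == 'B' :
--             flag = True
--             continue
--         if flag == True :
--             if balls[i] == 'R' :
--                 count += 1
--     return count
-- ===== SOURCE B (Python) =====
-- def right_red(balls):
--     # Scan the reversed sequence for the first 'B' (= rightmost 'B');
--     # everything after it in the reversed list is the prefix before it,
--     # so count the 'R's there. No 'B' at all -> 0.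
--     rev = list(balls)[::-1]
--     for j, x in enumerate(rev):
--         if x == 'B':
--             return rev[j + 1:].count('R')
--     return 0
-- ===== Notes on version B (the rewrite author's own statement) =====
-- stated objective: simpler
-- what changed: Replaces the flag-driven backward accumulation (a counter plus a 'seen B' flag carried through the whole loop) by locating the rightmost 'B' with a partial backward scan and then counting 'R' once over the remaining prefix.
import Mathlib
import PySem

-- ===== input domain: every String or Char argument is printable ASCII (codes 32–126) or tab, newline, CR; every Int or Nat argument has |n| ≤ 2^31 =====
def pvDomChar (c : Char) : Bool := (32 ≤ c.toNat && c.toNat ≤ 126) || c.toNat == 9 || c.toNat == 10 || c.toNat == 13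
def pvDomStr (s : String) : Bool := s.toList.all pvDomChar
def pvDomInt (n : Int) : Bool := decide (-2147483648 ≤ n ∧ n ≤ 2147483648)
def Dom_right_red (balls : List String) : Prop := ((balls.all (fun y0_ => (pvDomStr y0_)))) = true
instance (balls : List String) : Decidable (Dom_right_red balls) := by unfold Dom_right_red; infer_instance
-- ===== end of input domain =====

-- B replaces A's whole-loop flag-and-counter accumulation by a partial backward scan locating the rightmost "B" followed by one count of "R" over the prefix (objective: simpler).


-- ===== PORT A =====
-- for i in range(len(balls)-1, -1, -1) with state (count, flag)
def right_red (balls : List String) : Int :=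
  (((PySem.List.pyRange ((balls.length : Int) - 1) (-1) (-1)).foldl
      (fun (s : Int × Bool) i =>
        let b := PySem.List.pyGetD balls i ""
        if b = "B" then (s.1, true)
        else if s.2 = true then (if b = "R" then (s.1 + 1, s.2) else s) else s)
      (0, false))).1

-- ===== PORT B =====
-- the enumerate loop of Source B over rev = balls[::-1]: first 'B' found, count 'R' in the rest
def pvAltGo : List String → Int
  | [] => 0
  | x :: rest => if x = "B" then (rest.count "R" : Int) else pvAltGo rest

def right_red_alt (balls : List String) : Int :=
  pvAltGo balls.reverse

-- ===== PRECONDITION & SPEC =====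
def Spec_right_red (balls : List String) (out : Int) : Prop := out = right_red_alt balls
instance (balls : List String) (out : Int) : Decidable (Spec_right_red balls out) := by unfold Spec_right_red; infer_instance

-- ===== CLAIM (what is proved, stated in full; the proofs are below) =====
def Claim_equal_right_red : Prop := ∀ (balls : List String), Dom_right_red balls → Spec_right_red balls (right_red balls)

-- ===== LEMMAS AND PROOFS =====

-- abbreviation for A's loop body
def pvStep (s : Int × Bool) (b : String) : Int × Bool :=
  if b = "B" then (s.1, true)
  else if s.2 = true then (if b = "R" then (s.1 + 1, s.2) else s) else s

-- A's countdown index loop is a foldl of pvStep over balls.reverse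
theorem pv_range_rev (balls : List String) :
    (PySem.List.pyRange ((balls.length : Int) - 1) (-1) (-1)).map
        (fun i => PySem.List.pyGetD balls i "") = balls.reverse := by
  rw [PySem.List.pyRange_neg_one_eq_reverse]
  simp only [neg_add_cancel, sub_add_cancel]
  rw [List.map_reverse, PySem.List.map_pyGetD_pyRange_zero']

-- once the flag is set, the loop just counts 'R's
theorem pv_foldl_true (l : List String) (c : Int) :
    (l.foldl pvStep (c, true)).1 = c + (l.count "R" : Int) := by
  induction l generalizing c with
  | nil => simp
  | cons x rest ih =>
    by_cases hB : x = "B"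
    · subst hB
      simp [pvStep, ih]
    · by_cases hR : x = "R"
      · subst hR
        simp [pvStep, ih]
        ring
      · simp [pvStep, hB, hR, ih]

-- before the flag is set, the loop computes pvAltGo
theorem pv_foldl_false (l : List String) (c : Int) :
    (l.foldl pvStep (c, false)).1 = c + pvAltGo l := by
  induction l generalizing c with
  | nil => simp [pvAltGo]
  | cons x rest ih =>
    by_cases hB : x = "B"
    · subst hB
      simp [pvStep, pvAltGo, pv_foldl_true]
    · simp [pvStep, hB, pvAltGo, ih]

-- ===== VERDICT (by name: the statement is the Claim_ definition above) =====
theorem right_red_spec : Claim_equal_right_red := by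
  intro balls _
  unfold Spec_right_red right_red right_red_alt
  show ((PySem.List.pyRange ((balls.length : Int) - 1) (-1) (-1)).foldl
      (fun s i => pvStep s (PySem.List.pyGetD balls i "")) (0, false)).1 = pvAltGo balls.reverse
  rw [← List.foldl_map, pv_range_rev, pv_foldl_false]
  simp
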